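-- pv_equiv track=rewrite | github.com/John1400800/stuff | ege/task5/test10.py | lst_to_int
-- ===== SOURCE A (Python) =====
-- def lst_to_int(lst: list[int]) -> int:
--
--     res = 0
--     z = 0
--     for  n in lst[::-1]:
--         res += n*10**z
--         while n>0:
--             n //= 10
--             z += 1
--     return res
-- ===== SOURCE B (Python) =====
-- def lst_to_int(lst: list[int]) -> int:
--     # Forward single pass: shift the accumulator left by the digit count of
--     # each element (digit count computed by the same `while > 0` division loop).
--     res = 0
--     for n in lst:
--         m = n
--         d = 0
--         while m > 0:
--             m //= 10
--             d += 1
--         res = res * 10**d + n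
--     return res
-- ===== Notes on version B (the rewrite author's own statement) =====
-- stated objective: alternative
-- what changed: B scans the list forward and shifts the accumulator (res = res*10**d + n) by each element's own digit count, instead of A's reversed scan that keeps a growing total exponent z and adds n*10**z.
import Mathlib
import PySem

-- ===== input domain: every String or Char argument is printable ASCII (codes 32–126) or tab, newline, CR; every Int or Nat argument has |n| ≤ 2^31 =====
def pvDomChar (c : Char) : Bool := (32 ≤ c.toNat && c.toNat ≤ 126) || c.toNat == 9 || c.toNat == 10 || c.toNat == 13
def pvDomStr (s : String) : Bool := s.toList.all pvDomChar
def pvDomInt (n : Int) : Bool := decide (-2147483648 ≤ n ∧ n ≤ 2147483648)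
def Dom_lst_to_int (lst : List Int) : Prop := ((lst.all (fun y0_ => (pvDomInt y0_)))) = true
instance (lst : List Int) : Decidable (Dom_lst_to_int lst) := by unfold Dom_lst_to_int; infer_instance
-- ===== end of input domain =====

-- B scans forward shifting the accumulator by each element's digit count, instead of A's
-- reversed scan with a growing total exponent; same cost, different decomposition (objective: alternative).

-- ===== PORT A =====
-- the inner `while n > 0: n //= 10; z += 1`; n is discarded afterwards, so only z is returned
def lst_to_int_while (n z : Int) : Int :=
  if n > 0 then lst_to_int_while (PySem.Int.floordiv n 10) (z + 1) else z
termination_by n.toNat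
decreasing_by
  rw [PySem.Int.floordiv_eq_ediv_of_pos (by norm_num : (0:Int) < 10)]
  omega

def lst_to_int (lst : List Int) : Int :=
  -- lst[::-1] is PySem.List.slice? with step -1; step ≠ 0 so the none branch is unreachable
  let rev := (PySem.List.slice? lst none none (-1)).getD []
  -- z stays ≥ 0 throughout, so Python's 10**z is 10 ^ z.toNat
  (rev.foldl (fun (s : Int × Int) n =>
      (s.1 + n * 10 ^ s.2.toNat, lst_to_int_while n s.2)) (0, 0)).1

-- ===== PORT B =====
-- the `m = n; d = 0; while m > 0: m //= 10; d += 1` digit-count loop of Source B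
def lst_to_int_digits (m : Int) : Nat :=
  if m > 0 then lst_to_int_digits (PySem.Int.floordiv m 10) + 1 else 0
termination_by m.toNat
decreasing_by
  rw [PySem.Int.floordiv_eq_ediv_of_pos (by norm_num : (0:Int) < 10)]
  omega

def lst_to_int_alt (lst : List Int) : Int :=
  lst.foldl (fun res n => res * 10 ^ lst_to_int_digits n + n) 0

-- ===== PRECONDITION & SPEC =====
def Spec_lst_to_int (lst : List Int) (out : Int) : Prop := out = lst_to_int_alt lst
instance (lst : List Int) (out : Int) : Decidable (Spec_lst_to_int lst out) := by unfold Spec_lst_to_int; infer_instance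

-- ===== CLAIM (what is proved, stated in full; the proofs are below) =====
def Claim_equal_lst_to_int : Prop := ∀ (lst : List Int), Dom_lst_to_int lst → Spec_lst_to_int lst (lst_to_int lst)

-- ===== LEMMAS AND PROOFS =====

-- A's inner while-loop just adds the digit count to z
theorem while_eq_add_digits (n z : Int) :
    lst_to_int_while n z = z + (lst_to_int_digits n : Int) := by
  fun_induction lst_to_int_digits n generalizing z with
  | case1 m hm ih =>
      rw [lst_to_int_while, if_pos hm, ih]
      push_cast; ring
  | case2 m hm =>
      rw [lst_to_int_while, if_neg hm]
      simp

-- total digit count of a list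
def digSum (l : List Int) : Nat := (l.map lst_to_int_digits).sum

-- B's fold from an arbitrary accumulator
theorem foldB_shift (l : List Int) (r : Int) :
    l.foldl (fun res n => res * 10 ^ lst_to_int_digits n + n) r
      = r * 10 ^ digSum l + l.foldl (fun res n => res * 10 ^ lst_to_int_digits n + n) 0 := by
  induction l generalizing r with
  | nil => simp [digSum]
  | cons a l ih =>
      simp only [List.foldl_cons]
      rw [ih (r * 10 ^ lst_to_int_digits a + a), ih (0 * 10 ^ lst_to_int_digits a + a)]
      simp [digSum, pow_add]
      ring

-- A's fold over the reversed list, characterised in terms of B's value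
theorem foldA_char (l : List Int) (res : Int) (k : Nat) :
    (l.reverse.foldl (fun (s : Int × Int) n =>
        (s.1 + n * 10 ^ s.2.toNat, lst_to_int_while n s.2)) (res, (k : Int)))
      = (res + (l.foldl (fun res n => res * 10 ^ lst_to_int_digits n + n) 0) * 10 ^ k,
         ((k + digSum l : Nat) : Int)) := by
  induction l generalizing res k with
  | nil => simp [digSum]
  | cons a l ih =>
      rw [List.reverse_cons, List.foldl_append, ih]
      simp only [List.foldl_cons, List.foldl_nil]
      rw [while_eq_add_digits]
      simp only [Prod.mk.injEq]
      constructor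
      · rw [show (0:Int) * 10 ^ lst_to_int_digits a + a = a from by ring, foldB_shift l a]
        have ht : (((k + digSum l : Nat) : Int)).toNat = k + digSum l := by omega
        rw [ht]
        simp [digSum, pow_add]
        ring
      · simp [digSum]
        ring

-- ===== VERDICT (by name: the statement is the Claim_ definition above) =====
theorem lst_to_int_spec : Claim_equal_lst_to_int := by
  intro lst _
  unfold Spec_lst_to_int lst_to_int lst_to_int_alt
  rw [PySem.List.slice?_none_none_neg_one]
  simpa using congrArg Prod.fst (foldA_char lst 0 0)
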